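-- pv_equiv track=rewrite | github.com/grvn/aoc2018 | 08/day8-1.py | find_meta
-- ===== SOURCE A (Python) =====
-- def find_meta(input,metadata):
--   cnodes,meta=input[:2]
--   input=input[2:]
--   if cnodes==0:
--     metadata+=input[:meta]
--     return(input[meta:],metadata)
--   for _ in range(0, cnodes):
--     input,metadata=find_meta(input,metadata)
--   metadata+=input[:meta]
--   return(input[meta:],metadata)
-- ===== SOURCE B (Python) =====
-- def find_meta(input, metadata):
--     # Iterative post-order parse with an explicit stack of (children_remaining, meta_count)
--     # frames; mutates the same metadata list in place, like the original.
--     stack = [(1, 0)]  # virtual root: one child (the real root), no metadata of its own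
--     while stack:
--         children, meta = stack[-1]
--         if children > 0:
--             stack[-1] = (children - 1, meta)
--             c, m = input[0], input[1]
--             input = input[2:]
--             stack.append((c, m))
--         else:
--             stack.pop()
--             metadata += input[:meta]
--             input = input[meta:]
--     return (input, metadata)
-- ===== Notes on version B (the rewrite author's own statement) =====
-- stated objective: alternative
-- what changed: Replaces A's per-node recursion (with a folded loop of recursive calls over the children) by a single iterative while-loop over an explicit stack of (children_remaining, meta_count) frames that appends each node's metadata post-order.
import Mathlib
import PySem

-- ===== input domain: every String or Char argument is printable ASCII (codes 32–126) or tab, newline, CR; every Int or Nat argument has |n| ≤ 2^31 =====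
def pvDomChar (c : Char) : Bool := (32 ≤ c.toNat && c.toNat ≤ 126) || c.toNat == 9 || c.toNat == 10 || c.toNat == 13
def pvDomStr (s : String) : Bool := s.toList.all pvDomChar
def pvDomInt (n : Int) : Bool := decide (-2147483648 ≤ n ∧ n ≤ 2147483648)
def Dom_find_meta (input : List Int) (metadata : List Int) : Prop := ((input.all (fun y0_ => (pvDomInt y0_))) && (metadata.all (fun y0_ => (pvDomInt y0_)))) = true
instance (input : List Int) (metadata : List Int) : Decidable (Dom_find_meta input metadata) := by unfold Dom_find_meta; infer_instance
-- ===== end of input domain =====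

-- B replaces A's recursion by one iterative loop over an explicit stack of frames (alternative
-- decomposition, no speed claim); both Pythons mutate the SAME metadata list in place via `+=`
-- and return it — the equivalence proved here is about the return value.

-- ===== PORT A =====
-- Recursion in Python has no structural termination argument on malformed input, so the port
-- carries a fuel parameter; `find_meta` supplies `input.length + 1`, which is proved sufficient
-- on every input admitted by Pre_ (outside Pre_ the Python raises ValueError).
def findMetaA : Nat → List Int → List Int → List Int × List Int
  | 0, input, metadata => (input, metadata)            -- fuel exhausted: unreachable under Pre_
  | fuel+1, input, metadata =>
    match input with
    | cnodes :: mta :: rest =>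
      if cnodes = 0 then
        (PySem.List.slice rest (some mta) none,
         metadata ++ PySem.List.slice rest none (some mta))
      else
        -- for _ in range(0, cnodes): input, metadata = find_meta(input, metadata)
        let st := (PySem.List.pyRange 0 cnodes 1).foldl
          (fun (st : List Int × List Int) _ => findMetaA fuel st.1 st.2) (rest, metadata)
        (PySem.List.slice st.1 (some mta) none,
         st.2 ++ PySem.List.slice st.1 none (some mta))
    | _ => (input, metadata)                           -- Python: ValueError from unpacking; outside Pre_

def find_meta (input : List Int) (metadata : List Int) : List Int × List Int :=
  findMetaA (input.length + 1) input metadata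

-- ===== PORT B =====
-- The while-loop of Source B, as a fueled tail recursion; `find_meta_alt` supplies
-- `input.length + 2`, proved sufficient on every input admitted by Pre_.
def findMetaBLoop : Nat → List (Int × Int) → List Int → List Int → List Int × List Int
  | 0, _, input, metadata => (input, metadata)         -- fuel exhausted: unreachable under Pre_
  | fuel+1, stack, input, metadata =>
    match stack with
    | [] => (input, metadata)                          -- while stack: loop exits
    | (children, mta) :: rest =>
      if 0 < children then
        match input with
        | c :: m :: input' =>
          findMetaBLoop fuel ((c, m) :: (children - 1, mta) :: rest) input' metadata
        | _ => (input, metadata)                       -- Python: IndexError; outside Pre_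
      else
        findMetaBLoop fuel rest (PySem.List.slice input (some mta) none)
          (metadata ++ PySem.List.slice input none (some mta))

def find_meta_alt (input : List Int) (metadata : List Int) : List Int × List Int :=
  findMetaBLoop (input.length + 2) [(1, 0)] input metadata

-- ===== PRECONDITION & SPEC =====
-- Pre_ excludes exactly the inputs whose prefix is not a well-formed tree encoding
-- (header of child-count and metadata-count, the children, then the metadata entries):
-- there A raises ValueError from tuple unpacking, and B raises IndexError. A precondition for a
-- parser is inherently the grammar of its input: chkNode below is that grammar as a checker
-- (it also returns the remaining suffix and collected metadata, used by the proofs); the fuel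
-- argument only bounds the nesting depth and input.length + 1 is proved/checked sufficient.
mutual
def chkNode : Nat → List Int → Option (List Int × List Int)
  | 0, _ => none
  | f+1, c :: m :: rest =>
    (match chkKids f c.toNat rest with
     | some (r, mu) =>
        some (PySem.List.slice r (some m) none, mu ++ PySem.List.slice r none (some m))
     | none => none)
  | _+1, _ => none
def chkKids : Nat → Nat → List Int → Option (List Int × List Int)
  | _, 0, input => some (input, [])
  | 0, _+1, _ => none
  | f+1, k+1, input =>
    (match chkNode f input with
     | some (r1, mu1) =>
        (match chkKids f k r1 with
         | some (r, mu2) => some (r, mu1 ++ mu2)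
         | none => none)
     | none => none)
end

def Pre_find_meta (input : List Int) (_metadata : List Int) : Prop :=
  (chkNode (input.length + 1) input).isSome = true
instance (input : List Int) (metadata : List Int) : Decidable (Pre_find_meta input metadata) := by
  unfold Pre_find_meta; infer_instance

def pvWitness_find_meta : List Int × List Int := ([1, 1, 0, 2, 10, 11, 99], [])

def Spec_find_meta (input : List Int) (metadata : List Int) (out : List Int × List Int) : Prop := out = find_meta_alt input metadata
instance (input : List Int) (metadata : List Int) (out : List Int × List Int) : Decidable (Spec_find_meta input metadata out) := by unfold Spec_find_meta; infer_instance

-- ===== CLAIM (what is proved, stated in full; the proofs are below) =====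
def Claim_equal_find_meta : Prop := ∀ (input : List Int) (metadata : List Int), Dom_find_meta input metadata → Pre_find_meta input metadata → Spec_find_meta input metadata (find_meta input metadata)

-- ===== LEMMAS AND PROOFS =====

theorem len_sliceFrom_le (xs : List Int) (a : Int) :
    (PySem.List.slice xs (some a) none).length ≤ xs.length := by
  rw [PySem.List.slice_some_none]
  simp

-- the checker consumes at least the 2 header tokens per node and never grows the list
theorem chk_len (f : Nat) :
    (∀ input r mu, chkNode f input = some (r, mu) → r.length + 2 ≤ input.length) ∧
    (∀ k input r mu, chkKids f k input = some (r, mu) → r.length ≤ input.length) := by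
  induction f with
  | zero =>
    constructor
    · intro input r mu h; simp [chkNode] at h
    · intro k input r mu h
      cases k with
      | zero => simp [chkKids] at h; simp [h.1]
      | succ k => simp [chkKids] at h
  | succ f ih =>
    constructor
    · intro input r mu h
      match input with
      | [] => simp [chkNode] at h
      | [x] => simp [chkNode] at h
      | c :: m :: rest =>
        simp only [chkNode] at h
        split at h
        · rename_i r' mu' hk
          simp only [Option.some.injEq, Prod.mk.injEq] at h
          obtain ⟨hr, _⟩ := h
          have h1 := ih.2 c.toNat rest r' mu' hk
          have h2 := len_sliceFrom_le r' m
          rw [hr] at h2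
          simp only [List.length_cons]
          omega
        · simp at h
    · intro k input r mu h
      cases k with
      | zero => simp [chkKids] at h; simp [h.1]
      | succ k =>
        simp only [chkKids] at h
        split at h
        · rename_i r1 mu1 h1
          split at h
          · rename_i r2 mu2 h2
            simp only [Option.some.injEq, Prod.mk.injEq] at h
            obtain ⟨hr, _⟩ := h
            have a1 := ih.1 input r1 mu1 h1
            have a2 := ih.2 k r1 r2 mu2 h2
            rw [hr] at a2
            omega
          · simp at h
        · simp at h

theorem loopB_nil (f : Nat) (input md : List Int) :
    findMetaBLoop f [] input md = (input, md) := by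
  cases f <;> simp [findMetaBLoop]

-- the loop's result does not depend on the fuel once the fuel exceeds input.length + stack.length
theorem loopB_fuel : ∀ (fuel fuel' : Nat) (S : List (Int × Int)) (input md : List Int),
    input.length + S.length < fuel → input.length + S.length < fuel' →
    findMetaBLoop fuel S input md = findMetaBLoop fuel' S input md := by
  intro fuel
  induction fuel with
  | zero => intro fuel' S input md h _; omega
  | succ fuel ih =>
    intro fuel' S input md h h'
    cases fuel' with
    | zero => omega
    | succ fuel' =>
      cases S with
      | nil => simp [findMetaBLoop]
      | cons fr S' =>
        obtain ⟨c, mt⟩ := fr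
        by_cases hc : 0 < c
        · match input with
          | [] => simp [findMetaBLoop, hc]
          | [x] => simp [findMetaBLoop, hc]
          | a :: b :: tl =>
            simp only [findMetaBLoop, if_pos hc]
            apply ih
            · simp at h ⊢; omega
            · simp at h' ⊢; omega
        · simp only [findMetaBLoop, if_neg hc]
          apply ih
          · have := len_sliceFrom_le input mt; simp at h ⊢; omega
          · have := len_sliceFrom_le input mt; simp at h' ⊢; omega

theorem loopB_pop (g : Nat) (c mta : Int) (S : List (Int × Int)) (input md : List Int)
    (hc : ¬ 0 < c) :
    findMetaBLoop (g+1) ((c, mta) :: S) input md =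
      findMetaBLoop g S (PySem.List.slice input (some mta) none)
        (md ++ PySem.List.slice input none (some mta)) := by
  simp only [findMetaBLoop, if_neg hc]

theorem loopB_push (g : Nat) (c mta : Int) (S : List (Int × Int)) (a b : Int)
    (tl md : List Int) (hc : 0 < c) :
    findMetaBLoop (g+1) ((c, mta) :: S) (a :: b :: tl) md =
      findMetaBLoop g ((a, b) :: (c - 1, mta) :: S) tl md := by
  simp only [findMetaBLoop, if_pos hc]

-- folding a function that ignores the list elements is iteration |l| times
theorem foldl_ignore {α β : Type} (l : List β) (g : α → α) (s : α) :
    l.foldl (fun st _ => g st) s = g^[l.length] s := by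
  induction l generalizing s with
  | nil => rfl
  | cons x l ih => simp [List.foldl_cons, ih, Function.iterate_succ_apply]

-- A computes what the checker computes: on a checked node, findMetaA returns the remaining
-- suffix and appends exactly the collected metadata
theorem chkA (f : Nat) :
    (∀ input r mu, chkNode f input = some (r, mu) →
      ∀ fuel md, input.length < 2 * fuel → findMetaA fuel input md = (r, md ++ mu)) ∧
    (∀ k input r mu, chkKids f k input = some (r, mu) →
      ∀ fuel md, input.length < 2 * fuel →
        (fun st : List Int × List Int => findMetaA fuel st.1 st.2)^[k] (input, md) = (r, md ++ mu)) := by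
  induction f with
  | zero =>
    constructor
    · intro input r mu h; simp [chkNode] at h
    · intro k input r mu h fuel md hb
      cases k with
      | zero =>
        simp only [chkKids, Option.some.injEq, Prod.mk.injEq] at h
        obtain ⟨h1, h2⟩ := h
        simp [← h1, ← h2]
      | succ k => simp [chkKids] at h
  | succ f ih =>
    have hP : ∀ input r mu, chkNode (f+1) input = some (r, mu) →
        ∀ fuel md, input.length < 2 * fuel → findMetaA fuel input md = (r, md ++ mu) := by
      intro input r mu h fuel md hb
      match input, fuel with
      | [], _ => simp [chkNode] at h
      | [x], _ => simp [chkNode] at h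
      | c :: m :: rest, 0 => simp at hb
      | c :: m :: rest, fl+1 =>
        simp only [chkNode] at h
        split at h
        · rename_i r' mu' hk
          simp only [Option.some.injEq, Prod.mk.injEq] at h
          obtain ⟨hr, hmu⟩ := h
          by_cases hc : c = 0
          · subst hc
            simp only [Int.toNat_zero, chkKids, Option.some.injEq, Prod.mk.injEq] at hk
            obtain ⟨h1, h2⟩ := hk
            simp [findMetaA, ← hr, ← hmu, ← h1, ← h2]
          · have hbr : rest.length < 2 * fl := by
              simp only [List.length_cons] at hb; omega
            have e := ih.2 c.toNat rest r' mu' hk fl md hbr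
            simp only [findMetaA, if_neg hc]
            rw [foldl_ignore, PySem.List.length_pyRange_one]
            simp only [Int.sub_zero]
            rw [e, ← hr, ← hmu, List.append_assoc]
        · simp at h
    refine ⟨hP, ?_⟩
    intro k input r mu h fuel md hb
    cases k with
    | zero =>
      simp only [chkKids, Option.some.injEq, Prod.mk.injEq] at h
      obtain ⟨h1, h2⟩ := h
      simp [← h1, ← h2]
    | succ k =>
      simp only [chkKids] at h
      split at h
      · rename_i r1 mu1 h1
        split at h
        · rename_i r2 mu2 h2
          simp only [Option.some.injEq, Prod.mk.injEq] at h
          obtain ⟨hr, hmu⟩ := h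
          have e1 := ih.1 input r1 mu1 h1 fuel md hb
          have hlen := (chk_len f).1 input r1 mu1 h1
          have e2 := ih.2 k r1 r2 mu2 h2 fuel (md ++ mu1) (by omega)
          rw [Function.iterate_succ_apply]
          dsimp only
          rw [e1, e2, ← hr, ← hmu, List.append_assoc]
        · simp at h
      · simp at h

-- B's loop, on a frame whose k = children.toNat pending children parse by the checker,
-- processes them and the frame's metadata, then continues with the rest of the stack
theorem chkB : ∀ (f : Nat), ∀ (k : Nat) (input r mu : List Int),
    chkKids f k input = some (r, mu) →
    ∀ (c m : Int) (S : List (Int × Int)) (md : List Int) (fuel : Nat),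
      c.toNat = k → input.length + S.length + 1 < fuel →
      findMetaBLoop fuel ((c, m) :: S) input md =
        findMetaBLoop fuel S (PySem.List.slice r (some m) none)
          ((md ++ mu) ++ PySem.List.slice r none (some m)) := by
  intro f
  induction f using Nat.strong_induction_on with
  | _ f ihf =>
    intro k input r mu h c m S md fuel hk hb
    cases k with
    | zero =>
      simp only [chkKids, Option.some.injEq, Prod.mk.injEq] at h
      obtain ⟨h1, h2⟩ := h
      match fuel with
      | 0 => omega
      | g+1 =>
        have hc : ¬ 0 < c := by omega
        rw [loopB_pop g c m S input md hc, ← h1, ← h2, List.append_nil]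
        exact loopB_fuel g (g+1) S _ _
          (by have := len_sliceFrom_le input m; omega)
          (by have := len_sliceFrom_le input m; omega)
    | succ k =>
      cases f with
      | zero => simp [chkKids] at h
      | succ f1 =>
        simp only [chkKids] at h
        split at h
        · rename_i r1 mu1 h1
          split at h
          · rename_i r2 mu2 h2
            simp only [Option.some.injEq, Prod.mk.injEq] at h
            obtain ⟨hr, hmu⟩ := h
            cases f1 with
            | zero => simp [chkNode] at h1
            | succ f2 =>
              match input with
              | [] => simp [chkNode] at h1
              | [x] => simp [chkNode] at h1
              | c' :: m' :: rest =>
                simp only [chkNode] at h1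
                split at h1
                · rename_i r'' mu'' hk'
                  simp only [Option.some.injEq, Prod.mk.injEq] at h1
                  obtain ⟨er, emu⟩ := h1
                  have hc : 0 < c := by omega
                  match fuel with
                  | 0 => omega
                  | g+1 =>
                    rw [loopB_push g c m S c' m' rest md hc]
                    have hblen : rest.length + ((c-1, m) :: S).length + 1 < g := by
                      simp only [List.length_cons] at hb ⊢; omega
                    rw [ihf f2 (by omega) c'.toNat rest r'' mu'' hk' c' m'
                      ((c-1, m) :: S) md g rfl hblen]
                    rw [List.append_assoc, emu, er]
                    have hlen1 : r1.length ≤ rest.length := by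
                      have t1 := len_sliceFrom_le r'' m'
                      have t2 := (chk_len f2).2 c'.toNat rest r'' mu'' hk'
                      rw [← er]; omega
                    have e2 := ihf (f2+1) (by omega) k r1 r2 mu2 h2 (c-1) m S (md ++ mu1) g
                      (by omega) (by simp only [List.length_cons] at hb; omega)
                    have hlen2 : r2.length ≤ r1.length := (chk_len (f2+1)).2 k r1 r2 mu2 h2
                    have hrl : r.length ≤ rest.length := by rw [← hr]; omega
                    rw [e2, hr, List.append_assoc md mu1 mu2, hmu]
                    have hs := len_sliceFrom_le r m
                    refine loopB_fuel g (g+1) S _ _ ?_ ?_ <;>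
                      (simp only [List.length_cons] at hb; omega)
                · simp at h1
          · simp at h
        · simp at h

-- ===== VERDICT (by name: the statement is the Claim_ definition above) =====
theorem find_meta_spec : Claim_equal_find_meta := by
  intro input md _ hpre
  unfold Spec_find_meta
  unfold Pre_find_meta at hpre
  obtain ⟨⟨r, mu⟩, hp⟩ := Option.isSome_iff_exists.mp hpre
  match input with
  | [] => simp [chkNode] at hp
  | [x] => simp [chkNode] at hp
  | c :: m :: rest =>
    have h3 : (c :: m :: rest).length + 1 = rest.length + 3 := by simp
    rw [h3] at hp
    -- A computes (r, md ++ mu)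
    have hA : find_meta (c :: m :: rest) md = (r, md ++ mu) := by
      unfold find_meta
      rw [h3]
      exact (chkA (rest.length+3)).1 (c :: m :: rest) r mu hp (rest.length+3) md
        (by simp only [List.length_cons]; omega)
    -- B computes (r, md ++ mu) as well
    have hB : find_meta_alt (c :: m :: rest) md = (r, md ++ mu) := by
      unfold find_meta_alt
      have h4 : (c :: m :: rest).length + 2 = (rest.length + 3) + 1 := by simp
      rw [h4]
      rw [loopB_push (rest.length+3) 1 0 [] c m rest md (by norm_num)]
      simp only [chkNode] at hp
      split at hp
      · rename_i r'' mu'' hk'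
        simp only [Option.some.injEq, Prod.mk.injEq] at hp
        obtain ⟨er, emu⟩ := hp
        rw [chkB (rest.length+2) c.toNat rest r'' mu'' hk' c m [(1-1, 0)] md
          (rest.length+3) rfl (by simp)]
        rw [List.append_assoc, emu, er]
        have h5 : rest.length + 3 = (rest.length + 2) + 1 := by omega
        rw [h5, loopB_pop (rest.length+2) (1-1) 0 [] r (md ++ mu) (by norm_num)]
        rw [PySem.List.slice_zero_start, PySem.List.slice_none_none,
          PySem.List.slice_to r (le_refl 0), loopB_nil]
        simp
      · simp at hp
    rw [hA, hB]
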